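-- pv_equiv track=rewrite | github.com/SolTB/Bio331 | Lab3.py | degree_calculator
-- ===== SOURCE A (Python) =====
-- def degree_calculator(nodes,edges):
-- 	DegreeDict = {}
-- 	for n in nodes: #goes through all the nodes
-- 		degree = 0
-- 		for e in edges: #checks if that node is in an edge by going through each edge
-- 			if n in e:
-- 				degree = degree + 1 #if there is an edge add 1 to the degree
-- 		DegreeDict[n] = degree #creates dictionary of node to degree
-- 	return DegreeDict
-- ===== SOURCE B (Python) =====
-- def degree_calculator(nodes, edges):
--     counts = {}
--     for e in edges:
--         for v in dict.fromkeys(e):  # distinct endpoints of this edge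
--             counts[v] = counts.get(v, 0) + 1
--     return {n: counts.get(n, 0) for n in nodes}
-- ===== Notes on version B (the rewrite author's own statement) =====
-- stated objective: faster
-- what changed: Replaced A's per-node scan over all edges with a single pass over edges building a counter dict keyed by distinct endpoints, then one dict lookup per node.
import Mathlib
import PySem

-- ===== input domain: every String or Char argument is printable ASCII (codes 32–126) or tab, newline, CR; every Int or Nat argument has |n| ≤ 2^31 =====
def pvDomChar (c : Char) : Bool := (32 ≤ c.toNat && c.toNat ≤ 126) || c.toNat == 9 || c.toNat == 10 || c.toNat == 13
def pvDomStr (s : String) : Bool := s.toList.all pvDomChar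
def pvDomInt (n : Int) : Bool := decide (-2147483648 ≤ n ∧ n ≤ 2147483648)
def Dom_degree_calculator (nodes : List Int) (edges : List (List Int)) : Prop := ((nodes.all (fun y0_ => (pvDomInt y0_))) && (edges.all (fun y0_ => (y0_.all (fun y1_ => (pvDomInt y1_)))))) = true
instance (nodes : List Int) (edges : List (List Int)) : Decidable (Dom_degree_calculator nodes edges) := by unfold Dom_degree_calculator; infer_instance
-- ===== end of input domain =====

-- B replaces A's per-node scan of all edges (O(n*m)) by one pass over the edges building a
-- counter dict, then a lookup per node (O(n+m)); objective: faster (asymptotic).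

-- ===== PORT A =====
-- A: for each node, scan every edge and count those containing it; insert into a dict.
def degree_calculator (nodes : List Int) (edges : List (List Int)) : List (Int × Int) :=
  (nodes.foldl (fun d n =>
      d.insert n (edges.foldl (fun degree e => if n ∈ e then degree + 1 else degree) 0))
    (PySem.Dict.empty : PySem.Dict Int Int)).items

-- ===== PORT B =====
-- B: one pass over edges incrementing a counter per distinct endpoint, then one lookup per node.
def degree_calculator_alt (nodes : List Int) (edges : List (List Int)) : List (Int × Int) :=
  let counts : PySem.Dict Int Int :=
    edges.foldl (fun c e =>
      (PySem.List.dedup e).foldl (fun c v => c.modify v 0 (· + 1)) c) PySem.Dict.empty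
  (nodes.foldl (fun d n => d.insert n (counts.getD n 0))
    (PySem.Dict.empty : PySem.Dict Int Int)).items

-- ===== PRECONDITION & SPEC =====
def Spec_degree_calculator (nodes : List Int) (edges : List (List Int)) (out : List (Int × Int)) : Prop := out = degree_calculator_alt nodes edges
instance (nodes : List Int) (edges : List (List Int)) (out : List (Int × Int)) : Decidable (Spec_degree_calculator nodes edges out) := by unfold Spec_degree_calculator; infer_instance

-- ===== CLAIM (what is proved, stated in full; the proofs are below) =====
def Claim_equal_degree_calculator : Prop := ∀ (nodes : List Int) (edges : List (List Int)), Dom_degree_calculator nodes edges → Spec_degree_calculator nodes edges (degree_calculator nodes edges)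

-- ===== LEMMAS AND PROOFS =====

-- count of n in the dedup of e is 1 or 0 according to membership
lemma count_dedup (e : List Int) (n : Int) :
    (List.count n (PySem.List.dedup e) : Int) = if n ∈ e then 1 else 0 := by
  by_cases h : n ∈ e
  · rw [if_pos h]
    exact_mod_cast List.count_eq_one_of_mem (PySem.List.nodup_dedup e)
      ((PySem.List.mem_dedup e n).mpr h)
  · rw [if_neg h]
    exact_mod_cast List.count_eq_zero_of_not_mem
      (fun hm => h ((PySem.List.mem_dedup e n).mp hm))

-- B's counter dict holds, for every key n, the number of edges containing n
lemma counts_getD (edges : List (List Int)) (c : PySem.Dict Int Int) (n : Int) :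
    (edges.foldl (fun c e =>
        (PySem.List.dedup e).foldl (fun c v => c.modify v 0 (· + 1)) c) c).getD n 0
      = c.getD n 0 + (edges.countP (fun e => decide (n ∈ e)) : Int) := by
  induction edges generalizing c with
  | nil => simp
  | cons e es ih =>
      simp only [List.foldl_cons, ih, PySem.Dict.getD_foldl_modify_add_one, List.countP_cons,
        count_dedup]
      by_cases h : n ∈ e <;> simp [h] <;> ring

-- A's per-node inner loop counts the edges containing n
lemma inner_count (edges : List (List Int)) (n : Int) :
    edges.foldl (fun degree e => if n ∈ e then degree + 1 else degree) (0 : Int)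
      = (edges.countP (fun e => decide (n ∈ e)) : Int) := by
  have := PySem.List.foldl_count_if (fun e => decide (n ∈ e)) edges 0
  simpa using this

-- folds inserting pointwise-equal values from pointwise-equal maps agree
lemma foldl_insert_congr (f g : Int → Int) (h : ∀ n, f n = g n) (nodes : List Int)
    (d : PySem.Dict Int Int) :
    nodes.foldl (fun d n => d.insert n (f n)) d = nodes.foldl (fun d n => d.insert n (g n)) d := by
  induction nodes generalizing d with
  | nil => rfl
  | cons n ns ih => simp only [List.foldl_cons, h, ih]

-- ===== VERDICT (by name: the statement is the Claim_ definition above) =====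
theorem degree_calculator_spec : Claim_equal_degree_calculator := by
  intro nodes edges _
  unfold Spec_degree_calculator degree_calculator degree_calculator_alt
  congr 1
  exact foldl_insert_congr _ _
    (fun n => by rw [inner_count, counts_getD]; simp) nodes _
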